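-- pv_equiv track=rewrite | github.com/jrojer/sport | trash/problems/trees/tools/random_tree_generator.py | solve
-- ===== SOURCE A (Python) =====
-- def solve(root, inc_list):
--     inc_list = [sorted(l) for l in inc_list]
--     res = []
--     def dfs(root):
--         stack = [(root,0)]
--         while stack:
--             v, i = stack.pop()
--             if i == 0:
--                 res.append(v)
--             if i < len(inc_list[v]):
--                 stack.append((v,i+1))
--                 stack.append((inc_list[v][i],0))
--     dfs(root)
--     return res
-- ===== SOURCE B (Python) =====
-- def solve(root, inc_list):
--     children = [sorted(l) for l in inc_list]
--     def dfs(v):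
--         out = [v]
--         for c in children[v]:
--             out.extend(dfs(c))
--         return out
--     return dfs(root)
-- ===== Notes on version B (the rewrite author's own statement) =====
-- stated objective: simpler
-- what changed: Replaced A's explicit stack of (node, child-index) resumption frames with a direct recursive DFS that returns each subtree's preorder list and concatenates the sorted children's results.
import Mathlib
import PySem

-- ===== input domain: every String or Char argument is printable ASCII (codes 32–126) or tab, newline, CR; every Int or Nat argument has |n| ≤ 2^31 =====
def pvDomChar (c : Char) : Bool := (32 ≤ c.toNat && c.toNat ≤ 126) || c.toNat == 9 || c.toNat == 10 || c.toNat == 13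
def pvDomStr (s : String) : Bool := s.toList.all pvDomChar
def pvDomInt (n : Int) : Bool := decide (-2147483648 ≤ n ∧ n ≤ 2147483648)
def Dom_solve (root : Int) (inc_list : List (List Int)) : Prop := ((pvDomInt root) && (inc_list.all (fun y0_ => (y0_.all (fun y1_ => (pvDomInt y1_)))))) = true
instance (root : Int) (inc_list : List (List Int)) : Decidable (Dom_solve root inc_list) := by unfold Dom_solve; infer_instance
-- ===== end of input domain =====

-- B replaces A's explicit stack of (node, child-index) resumption frames with a direct
-- recursive DFS returning each subtree's preorder list (objective: simpler decomposition).


-- ===== PORT A =====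
-- A's while-loop over the explicit stack, made total by a fuel counter (a pure
-- termination guard; under Pre_solve the fuel is provably sufficient).
def runA (chl : List (List Int)) : Nat → List (Int × Int) → List Int → List Int
  | 0, _, res => res
  | _ + 1, [], res => res
  | f + 1, (v, i) :: stack, res =>
      let res1 := if i = 0 then res ++ [v] else res
      let l := PySem.List.pyGetD chl v []
      if i < (l.length : Int) then
        runA chl f ((PySem.List.pyGetD l i 0, 0) :: (v, i + 1) :: stack) res1
      else
        runA chl f stack res1

def solve (root : Int) (inc_list : List (List Int)) : List Int :=
  let chl := inc_list.map (fun l => PySem.List.sorted l id)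
  runA chl ((2 * chl.flatten.length + 2) ^ (inc_list.length + 1)) [(root, 0)] []

-- ===== PORT B =====
-- B's recursive dfs, made total by a fuel counter (a pure termination guard;
-- under Pre_solve the fuel is provably sufficient).
def dfsB (chl : List (List Int)) : Nat → Int → List Int
  | 0, v => [v]
  | f + 1, v => (PySem.List.pyGetD chl v []).foldl (fun out c => out ++ dfsB chl f c) [v]

def solve_alt (root : Int) (inc_list : List (List Int)) : List Int :=
  let chl := inc_list.map (fun l => PySem.List.sorted l id)
  dfsB chl (chl.length + 1) root

-- ===== PRECONDITION & SPEC =====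
-- The graph read by the DFS: node index normalization (Python's negative-index rule),
-- the normalized out-neighbour set of a node, and the reflexive-transitive closure of a
-- node set under out-neighbours, computed by saturation (length+1 rounds always suffice).
def normIdx (n : Nat) (v : Int) : Nat := (if v < 0 then v + n else v).toNat

def adjF (inc : List (List Int)) (u : Nat) : Finset Nat :=
  (((inc.getD u []).map (normIdx inc.length)).filter (· < inc.length)).toFinset

def stepSet (inc : List (List Int)) (s : Finset Nat) : Finset Nat :=
  s ∪ s.biUnion (adjF inc)

def iterStep (inc : List (List Int)) : Nat → Finset Nat → Finset Nat
  | 0, s => s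
  | k + 1, s => if stepSet inc s = s then s else iterStep inc k (stepSet inc s)

def closureF (inc : List (List Int)) (s : Finset Nat) : Finset Nat :=
  iterStep inc (inc.length + 1) s

-- nodes reachable from the root, and the (proper) descendants of a node
def Rset (root : Int) (inc : List (List Int)) : Finset Nat :=
  closureF inc {normIdx inc.length root}

def Dset (inc : List (List Int)) (u : Nat) : Finset Nat :=
  closureF inc (adjF inc u)

-- Pre_ is exactly the set of inputs on which A returns: the root is a valid (possibly
-- negative, Python-style) index, every node reachable from it has only valid child
-- indices, and no node reachable from the root lies on a cycle; otherwise A raises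
-- IndexError (invalid reachable index) or loops forever (reachable cycle).
def Pre_solve (root : Int) (inc_list : List (List Int)) : Prop :=
  (-(inc_list.length : Int) ≤ root ∧ root < inc_list.length) ∧
  (∀ u ∈ Rset root inc_list, ∀ c ∈ inc_list.getD u [],
      -(inc_list.length : Int) ≤ c ∧ c < inc_list.length) ∧
  (∀ u ∈ Rset root inc_list, u ∉ Dset inc_list u)
instance (root : Int) (inc_list : List (List Int)) : Decidable (Pre_solve root inc_list) := by
  unfold Pre_solve; infer_instance

def pvWitness_solve : Int × List (List Int) := (0, [[1, 2], [], [3], []])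

def Spec_solve (root : Int) (inc_list : List (List Int)) (out : List Int) : Prop := out = solve_alt root inc_list
instance (root : Int) (inc_list : List (List Int)) (out : List Int) : Decidable (Spec_solve root inc_list out) := by unfold Spec_solve; infer_instance

-- ===== CLAIM (what is proved, stated in full; the proofs are below) =====
def Claim_equal_solve : Prop := ∀ (root : Int) (inc_list : List (List Int)), Dom_solve root inc_list → Pre_solve root inc_list → Spec_solve root inc_list (solve root inc_list)

-- ===== LEMMAS AND PROOFS =====

def chlOf (inc : List (List Int)) : List (List Int) :=
  inc.map (fun l => PySem.List.sorted l id)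

theorem chlOf_eq (inc : List (List Int)) :
    chlOf inc = inc.map (fun l => PySem.List.sorted l id) := rfl

def rank (inc : List (List Int)) (u : Nat) : Nat := (Dset inc u).card

-- ---- generic closure lemmas ----

theorem adjF_subset_range (inc : List (List Int)) (u : Nat) :
    adjF inc u ⊆ Finset.range inc.length := by
  intro x hx
  simp only [adjF, List.mem_toFinset, List.mem_filter, decide_eq_true_eq] at hx
  simp only [Finset.mem_range]
  exact hx.2

theorem subset_stepSet (inc : List (List Int)) (s : Finset Nat) :
    s ⊆ stepSet inc s := Finset.subset_union_left

theorem stepSet_subset_range (inc : List (List Int)) (s : Finset Nat)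
    (hs : s ⊆ Finset.range inc.length) :
    stepSet inc s ⊆ Finset.range inc.length := by
  apply Finset.union_subset hs
  apply Finset.biUnion_subset.mpr
  intro u _
  exact adjF_subset_range inc u

theorem subset_iterStep (inc : List (List Int)) :
    ∀ k (s : Finset Nat), s ⊆ iterStep inc k s := by
  intro k
  induction k with
  | zero => intro s; exact subset_refl s
  | succ k ih =>
    intro s
    show s ⊆ if stepSet inc s = s then s else iterStep inc k (stepSet inc s)
    split
    · exact subset_refl s
    · exact subset_trans (subset_stepSet inc s) (ih (stepSet inc s))

theorem iterStep_subset_range (inc : List (List Int)) :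
    ∀ k (s : Finset Nat), s ⊆ Finset.range inc.length →
      iterStep inc k s ⊆ Finset.range inc.length := by
  intro k
  induction k with
  | zero => intro s hs; exact hs
  | succ k ih =>
    intro s hs
    show (if stepSet inc s = s then s else iterStep inc k (stepSet inc s)) ⊆ _
    split
    · exact hs
    · exact ih (stepSet inc s) (stepSet_subset_range inc s hs)

theorem iterStep_closed (inc : List (List Int)) :
    ∀ k (s : Finset Nat), s ⊆ Finset.range inc.length →
      inc.length + 1 ≤ k + s.card →
      stepSet inc (iterStep inc k s) = iterStep inc k s := by
  intro k
  induction k with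
  | zero =>
    intro s hs hk
    have := Finset.card_le_card hs
    simp only [Finset.card_range] at this
    omega
  | succ k ih =>
    intro s hs hk
    simp only [iterStep]
    by_cases h : stepSet inc s = s
    · rw [if_pos h, h]
    · rw [if_neg h]
      apply ih (stepSet inc s) (stepSet_subset_range inc s hs)
      have hss : s ⊂ stepSet inc s :=
        Finset.ssubset_iff_subset_ne.mpr ⟨subset_stepSet inc s, fun he => h he.symm⟩
      have := Finset.card_lt_card hss
      omega

theorem closureF_closed (inc : List (List Int)) (s : Finset Nat)
    (hs : s ⊆ Finset.range inc.length) :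
    stepSet inc (closureF inc s) = closureF inc s :=
  iterStep_closed inc (inc.length + 1) s hs (by omega)

theorem mem_closed_adj (inc : List (List Int)) (t : Finset Nat)
    (hclosed : stepSet inc t = t) (u : Nat) (hu : u ∈ t) :
    adjF inc u ⊆ t := by
  intro x hx
  have : x ∈ stepSet inc t := by
    apply Finset.mem_union_right
    exact Finset.mem_biUnion.mpr ⟨u, hu, hx⟩
  rwa [hclosed] at this

theorem subset_closureF (inc : List (List Int)) (s : Finset Nat) :
    s ⊆ closureF inc s := subset_iterStep inc _ s

theorem closureF_minimal (inc : List (List Int)) (s t : Finset Nat)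
    (ht : ∀ u ∈ t, adjF inc u ⊆ t) (hst : s ⊆ t) :
    closureF inc s ⊆ t := by
  unfold closureF
  generalize inc.length + 1 = k
  induction k generalizing s with
  | zero => exact hst
  | succ k ih =>
    show (if stepSet inc s = s then s else iterStep inc k (stepSet inc s)) ⊆ t
    split
    · exact hst
    · refine ih (stepSet inc s) ?_
      apply Finset.union_subset hst
      apply Finset.biUnion_subset.mpr
      intro u hu
      exact ht u (hst hu)

theorem Dset_closed (inc : List (List Int)) (u : Nat) :
    stepSet inc (Dset inc u) = Dset inc u :=
  closureF_closed inc _ (adjF_subset_range inc u)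

theorem Dset_subset (inc : List (List Int)) (u c : Nat) (hc : c ∈ adjF inc u) :
    Dset inc c ⊆ Dset inc u := by
  have hcD : c ∈ Dset inc u := subset_closureF inc _ hc
  apply closureF_minimal
  · intro w hw
    exact mem_closed_adj inc _ (Dset_closed inc u) w hw
  · exact mem_closed_adj inc _ (Dset_closed inc u) c hcD

-- ---- the rank measure on reachable nodes ----

theorem rank_le_len (inc : List (List Int)) (u : Nat) : rank inc u ≤ inc.length := by
  have hsub : Dset inc u ⊆ Finset.range inc.length :=
    iterStep_subset_range inc (inc.length + 1) _ (adjF_subset_range inc u)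
  have := Finset.card_le_card hsub
  simpa [rank] using this

theorem rank_lt (root : Int) (inc : List (List Int))
    (hacyc : ∀ u ∈ Rset root inc, u ∉ Dset inc u)
    (hroot : normIdx inc.length root < inc.length)
    (u c : Nat) (hu : u ∈ Rset root inc) (hc : c ∈ adjF inc u) :
    c ∈ Rset root inc ∧ rank inc c < rank inc u := by
  have hRclosed : stepSet inc (Rset root inc) = Rset root inc := by
    apply closureF_closed
    intro x hx
    simp only [Finset.mem_singleton] at hx
    simp only [Finset.mem_range]
    omega
  have hcR : c ∈ Rset root inc := mem_closed_adj inc _ hRclosed u hu hc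
  refine ⟨hcR, ?_⟩
  apply Finset.card_lt_card
  refine Finset.ssubset_iff_subset_ne.mpr ⟨Dset_subset inc u c hc, ?_⟩
  intro heq
  have hcD : c ∈ Dset inc u := subset_closureF inc _ hc
  rw [← heq] at hcD
  exact hacyc c hcR hcD

-- ---- bridging the port's Python indexing to the normalized graph ----

theorem normIdx_lt (n : Nat) (v : Int) (h1 : -(n : Int) ≤ v) (h2 : v < n) :
    normIdx n v < n := by
  unfold normIdx; split <;> omega

theorem pyGetD_norm (xs : List (List Int)) (v : Int)
    (h1 : -(xs.length : Int) ≤ v) (_h2 : v < xs.length) :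
    PySem.List.pyGetD xs v [] = xs.getD (normIdx xs.length v) [] := by
  by_cases hv : v < 0
  · have hveq : v = -(((-v).toNat : Nat) : Int) := by omega
    rw [hveq]
    rw [PySem.List.pyGetD_neg_natCast _ _ _ (by omega) (by omega)]
    have hnorm : normIdx xs.length (-(((-v).toNat : Nat) : Int)) = xs.length - (-v).toNat := by
      unfold normIdx
      rw [if_pos (by omega)]
      omega
    rw [hnorm, List.getD_eq_getElem _ _ (by omega)]
  · have hveq : v = ((v.toNat : Nat) : Int) := by omega
    rw [hveq, PySem.List.pyGetD_natCast]
    have hnorm : normIdx xs.length (((v.toNat : Nat)) : Int) = v.toNat := by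
      unfold normIdx
      rw [if_neg (by omega)]
      omega
    rw [hnorm]

theorem pyGetD_chl (inc : List (List Int)) (v : Int)
    (h1 : -(inc.length : Int) ≤ v) (h2 : v < inc.length) :
    PySem.List.pyGetD (chlOf inc) v []
      = PySem.List.sorted (inc.getD (normIdx inc.length v) []) id := by
  have hlen : (chlOf inc).length = inc.length := by simp [chlOf]
  have hlt : normIdx inc.length v < inc.length := normIdx_lt _ _ h1 h2
  rw [pyGetD_norm (chlOf inc) v (by omega) (by omega)]
  have hsame : normIdx (chlOf inc).length v = normIdx inc.length v := by rw [hlen]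
  rw [hsame, List.getD_eq_getElem _ _ (by omega), List.getD_eq_getElem _ _ hlt]
  simp [chlOf]

-- one DFS step: a child read by the port from a valid reachable node is itself valid,
-- reachable, and of strictly smaller rank
theorem step_good (root : Int) (inc : List (List Int)) (hpre : Pre_solve root inc)
    (v : Int) (hv1 : -(inc.length : Int) ≤ v) (hv2 : v < inc.length)
    (hvR : normIdx inc.length v ∈ Rset root inc)
    (c : Int) (hc : c ∈ PySem.List.pyGetD (chlOf inc) v []) :
    (-(inc.length : Int) ≤ c ∧ c < inc.length) ∧
      normIdx inc.length c ∈ Rset root inc ∧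
      rank inc (normIdx inc.length c) < rank inc (normIdx inc.length v) := by
  obtain ⟨⟨hr1, hr2⟩, ha, hb⟩ := hpre
  rw [pyGetD_chl inc v hv1 hv2, PySem.List.mem_sorted] at hc
  have hcb := ha (normIdx inc.length v) hvR c hc
  have hadj : normIdx inc.length c ∈ adjF inc (normIdx inc.length v) := by
    simp only [adjF, List.mem_toFinset, List.mem_filter, decide_eq_true_eq]
    constructor
    · exact List.mem_map_of_mem hc
    · unfold normIdx; split <;> omega
  have hroot : normIdx inc.length root < inc.length := by
    unfold normIdx; split <;> omega
  obtain ⟨h1, h2⟩ := rank_lt root inc hb hroot _ _ hvR hadj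
  exact ⟨hcb, h1, h2⟩

-- ---- the two fuelled programs, under the Pre_ measure ----

theorem runA_nil (chl : List (List Int)) (f : Nat) (res : List Int) :
    runA chl f [] res = res := by
  cases f <;> rfl

theorem list_le_sum (ns : List Nat) (x : Nat) (h : x ∈ ns) : x ≤ ns.sum := by
  induction ns with
  | nil => cases h
  | cons a t ih =>
    rcases List.mem_cons.mp h with rfl | h'
    · simp [List.sum_cons]
    · have := ih h'
      simp only [List.sum_cons]
      omega

theorem foldl_append_eq_append_flatMap (h : Int → List Int) (l : List Int) (init : List Int) :
    l.foldl (fun out c => out ++ h c) init = init ++ l.flatMap h := by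
  induction l generalizing init with
  | nil => simp
  | cons a t ih => simp [List.foldl_cons, ih, List.flatMap_cons]

theorem dfsB_fuel (root : Int) (inc : List (List Int)) (hpre : Pre_solve root inc) :
    ∀ e : Nat, ∀ v : Int, -(inc.length : Int) ≤ v → v < inc.length →
      normIdx inc.length v ∈ Rset root inc →
      rank inc (normIdx inc.length v) < e →
      ∀ f g : Nat, rank inc (normIdx inc.length v) < f → rank inc (normIdx inc.length v) < g →
        dfsB (chlOf inc) f v = dfsB (chlOf inc) g v := by
  intro e
  induction e with
  | zero => omega
  | succ e ih =>
    intro v hv1 hv2 hvR he f g hf hg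
    obtain ⟨f', rfl⟩ : ∃ f', f = f' + 1 := ⟨f - 1, by omega⟩
    obtain ⟨g', rfl⟩ : ∃ g', g = g' + 1 := ⟨g - 1, by omega⟩
    simp only [dfsB]
    apply List.foldl_ext
    intro acc c hc
    obtain ⟨⟨hc1, hc2⟩, hcR, hclt⟩ := step_good root inc hpre v hv1 hv2 hvR c hc
    rw [ih c hc1 hc2 hcR (by omega) f' g' (by omega) (by omega)]

theorem runA_inner (chl : List (List Int)) (v : Int) (l : List Int)
    (hl : l = PySem.List.pyGetD chl v []) (e' : Nat)
    (IHc : ∀ c ∈ l, ∃ k ≤ (2 * chl.flatten.length + 2) ^ e',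
      ∀ (f : Nat) (stack : List (Int × Int)) (res : List Int),
        runA chl (k + f) ((c, 0) :: stack) res = runA chl f stack (res ++ dfsB chl e' c)) :
    ∀ j i : Nat, i + j = l.length →
      ∃ k ≤ (l.length - i + 1) + (l.length - i) * (2 * chl.flatten.length + 2) ^ e',
        ∀ (f : Nat) (stack : List (Int × Int)) (res : List Int),
          runA chl (k + f) ((v, (i : Int)) :: stack) res
            = runA chl f stack
                ((if (i : Int) = 0 then res ++ [v] else res) ++ (l.drop i).flatMap (dfsB chl e')) := by
  intro j
  induction j with
  | zero =>
    intro i hij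
    refine ⟨1, by omega, ?_⟩
    intro f stack res
    have hnotlt : ¬ ((i : Int) < ((PySem.List.pyGetD chl v []).length : Int)) := by
      rw [← hl]; omega
    have hdrop : l.drop i = [] := by
      apply List.drop_eq_nil_of_le; omega
    have h1f : 1 + f = f + 1 := by omega
    rw [h1f]
    simp only [runA, hnotlt, if_false, hdrop, List.flatMap_nil, List.append_nil]
  | succ j ihj =>
    intro i hij
    have hilt : i < l.length := by omega
    obtain ⟨k', hk'b, hk'⟩ := ihj (i + 1) (by omega)
    have hcmem : l[i] ∈ l := List.getElem_mem hilt
    obtain ⟨kc, hkcb, hkc⟩ := IHc l[i] hcmem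
    refine ⟨1 + kc + k', ?_, ?_⟩
    · have hx : (l.length - i) * (2 * chl.flatten.length + 2) ^ e'
          = (l.length - (i + 1)) * (2 * chl.flatten.length + 2) ^ e'
            + (2 * chl.flatten.length + 2) ^ e' := by
        have h1 : l.length - i = (l.length - (i + 1)) + 1 := by omega
        rw [h1, Nat.succ_mul]
      omega
    · intro f stack res
      have hlt : ((i : Int) < ((PySem.List.pyGetD chl v []).length : Int)) := by
        rw [← hl]; omega
      have hstep : runA chl (1 + kc + k' + f) ((v, (i : Int)) :: stack) res
          = runA chl (kc + (k' + f))
              ((PySem.List.pyGetD (PySem.List.pyGetD chl v []) (i : Int) 0, 0)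
                 :: (v, (i : Int) + 1) :: stack)
              (if (i : Int) = 0 then res ++ [v] else res) := by
        have h1 : 1 + kc + k' + f = (kc + (k' + f)) + 1 := by omega
        rw [h1]
        simp only [runA, hlt, if_true]
      rw [hstep]
      have hget : PySem.List.pyGetD (PySem.List.pyGetD chl v []) (i : Int) 0 = l[i] := by
        rw [← hl, PySem.List.pyGetD_natCast, List.getD_eq_getElem _ _ hilt]
      rw [hget, hkc]
      have hcast : ((i : Int)) + 1 = (((i + 1 : Nat)) : Int) := by push_cast; ring
      rw [hcast, hk']
      have hne : ¬ (((i + 1 : Nat) : Int) = 0) := by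
        push_cast; omega
      rw [if_neg hne]
      have hdrop : l.drop i = l[i] :: l.drop (i + 1) := List.drop_eq_getElem_cons hilt
      rw [hdrop, List.flatMap_cons]
      simp [List.append_assoc]

theorem runA_main (root : Int) (inc : List (List Int)) (hpre : Pre_solve root inc) :
    ∀ e : Nat, ∀ v : Int, -(inc.length : Int) ≤ v → v < inc.length →
      normIdx inc.length v ∈ Rset root inc →
      rank inc (normIdx inc.length v) < e →
      ∃ k ≤ (2 * (chlOf inc).flatten.length + 2) ^ (rank inc (normIdx inc.length v) + 1),
        ∀ (f : Nat) (stack : List (Int × Int)) (res : List Int),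
          runA (chlOf inc) (k + f) ((v, 0) :: stack) res
            = runA (chlOf inc) f stack
                (res ++ dfsB (chlOf inc) (rank inc (normIdx inc.length v) + 1) v) := by
  intro e
  induction e with
  | zero => omega
  | succ e ih =>
    intro v hv1 hv2 hvR he
    set chl := chlOf inc with hchl
    set l := PySem.List.pyGetD chl v [] with hl
    set C := 2 * chl.flatten.length + 2 with hC
    set e' := rank inc (normIdx inc.length v) with he'
    have hCpos : 1 ≤ C := by omega
    have IHc : ∀ c ∈ l, ∃ k ≤ C ^ e',
        ∀ (f : Nat) (stack : List (Int × Int)) (res : List Int),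
          runA chl (k + f) ((c, 0) :: stack) res = runA chl f stack (res ++ dfsB chl e' c) := by
      intro c hc
      obtain ⟨⟨hc1, hc2⟩, hcR, hclt⟩ := step_good root inc hpre v hv1 hv2 hvR c (by rw [← hl]; exact hc)
      obtain ⟨k, hkb, hk⟩ := ih c hc1 hc2 hcR (by omega)
      refine ⟨k, le_trans hkb (Nat.pow_le_pow_right hCpos (by omega)), ?_⟩
      intro f stack res
      rw [hk]
      have := dfsB_fuel root inc hpre (rank inc (normIdx inc.length c) + 1) c hc1 hc2 hcR
        (by omega) (rank inc (normIdx inc.length c) + 1) e' (by omega) (by omega)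
      rw [this]
    obtain ⟨k, hkb, hk⟩ := runA_inner chl v l hl e' IHc l.length 0 (by omega)
    have hlmem : l ∈ chl := by
      rw [hl]
      apply PySem.List.pyGetD_mem
      simp only [PySem.Raise.InRange]
      have : chl.length = inc.length := by simp [hchl, chlOf]
      omega
    have hlS : l.length ≤ chl.flatten.length := by
      rw [List.length_flatten]
      exact list_le_sum _ _ (List.mem_map_of_mem hlmem)
    refine ⟨k, ?_, ?_⟩
    · rw [pow_succ]
      have hx1 : 1 ≤ C ^ e' := Nat.one_le_pow _ _ (by omega)
      calc k ≤ (l.length - 0 + 1) + (l.length - 0) * C ^ e' := hkb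
        _ ≤ (chl.flatten.length + 1) * C ^ e' + chl.flatten.length * C ^ e' := by
            have := Nat.le_mul_of_pos_right (chl.flatten.length + 1) (by omega : 0 < C ^ e')
            have h2 : (l.length - 0) * C ^ e' ≤ chl.flatten.length * C ^ e' :=
              Nat.mul_le_mul_right _ (by omega)
            omega
        _ = C ^ e' * (2 * chl.flatten.length + 1) := by ring
        _ ≤ C ^ e' * C := Nat.mul_le_mul_left _ (by omega)
    · intro f stack res
      have hdfs : dfsB chl (e' + 1) v = [v] ++ l.flatMap (dfsB chl e') := by
        simp only [dfsB]
        rw [← hl, foldl_append_eq_append_flatMap]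
      simp only [Nat.cast_zero, if_true, List.drop_zero] at hk
      rw [hk f stack res, hdfs, ← List.append_assoc]

-- ===== VERDICT (by name: the statement is the Claim_ definition above) =====
theorem solve_spec : Claim_equal_solve := by
  intro root inc _ hpre
  unfold Spec_solve
  simp only [solve, solve_alt]
  rw [← chlOf_eq]
  have hr1 := hpre.1.1
  have hr2 := hpre.1.2
  have hrR : normIdx inc.length root ∈ Rset root inc := by
    apply subset_closureF
    simp
  have hrank : rank inc (normIdx inc.length root) ≤ inc.length := rank_le_len inc _
  obtain ⟨k, hkb, hk⟩ := runA_main root inc hpre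
    (rank inc (normIdx inc.length root) + 1) root hr1 hr2 hrR (by omega)
  have hCpos : 1 ≤ 2 * (chlOf inc).flatten.length + 2 := by omega
  have hkF : k ≤ (2 * (chlOf inc).flatten.length + 2) ^ (inc.length + 1) :=
    le_trans hkb (Nat.pow_le_pow_right hCpos (by omega))
  have hsplit : (2 * (chlOf inc).flatten.length + 2) ^ (inc.length + 1)
      = k + ((2 * (chlOf inc).flatten.length + 2) ^ (inc.length + 1) - k) := by omega
  rw [hsplit, hk, runA_nil, List.nil_append]
  have hlen : (chlOf inc).length = inc.length := by simp [chlOf]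
  exact dfsB_fuel root inc hpre (rank inc (normIdx inc.length root) + 1) root hr1 hr2 hrR
    (by omega) (rank inc (normIdx inc.length root) + 1) ((chlOf inc).length + 1)
    (by omega) (by omega)
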